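-- pv_equiv track=rewrite | github.com/calebabutler/Stack-Lang | stack-lang.py | stringisize
-- ===== SOURCE A (Python) =====
-- def stringisize(lst):
--     i = 0
--     string = ""
--     tokens = []
--     while i < len(lst):
--         if lst[i][0] == '"':
--             if lst[i][-1] != '"':
--                 string += lst[i][1:]
--                 i += 1
--                 while lst[i][-1] != '"':
--                     string += " "
--                     string += lst[i]
--                     i += 1
--                 string += " "
--                 string += lst[i][:-1]
--             else:
--                 string += lst[i][1:-1]
--             tokens.append(string)
--             string = ""
--         else:
--             tokens.append(lst[i])
--         i += 1
--     return tokens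
-- ===== SOURCE B (Python) =====
-- def stringisize(lst):
--     # Flat single-pass state machine: 'parts' buffer + ' '.join instead of
--     # A's nested index loops with manual string concatenation.
--     tokens = []
--     parts = None  # None = outside a quoted string; else list of collected pieces
--     for t in lst:
--         if parts is not None:
--             if t.endswith('"'):
--                 tokens.append(" ".join(parts + [t[:-1]]))
--                 parts = None
--             else:
--                 parts = parts + [t]
--         elif t.startswith('"'):
--             if t.endswith('"'):
--                 tokens.append(t[1:-1])
--             else:
--                 parts = [t[1:]]
--         else:
--             tokens.append(t)
--     return tokens
-- ===== Notes on version B (the rewrite author's own statement) =====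
-- stated objective: simpler
-- what changed: Replaced A's nested index-driven while loops with manual string concatenation by a flat single-pass state machine over the tokens that keeps a parts buffer and emits ' '.join(parts) when the closing quote arrives; B uses startswith/endswith instead of raw indexing and so is total.
import Mathlib
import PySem

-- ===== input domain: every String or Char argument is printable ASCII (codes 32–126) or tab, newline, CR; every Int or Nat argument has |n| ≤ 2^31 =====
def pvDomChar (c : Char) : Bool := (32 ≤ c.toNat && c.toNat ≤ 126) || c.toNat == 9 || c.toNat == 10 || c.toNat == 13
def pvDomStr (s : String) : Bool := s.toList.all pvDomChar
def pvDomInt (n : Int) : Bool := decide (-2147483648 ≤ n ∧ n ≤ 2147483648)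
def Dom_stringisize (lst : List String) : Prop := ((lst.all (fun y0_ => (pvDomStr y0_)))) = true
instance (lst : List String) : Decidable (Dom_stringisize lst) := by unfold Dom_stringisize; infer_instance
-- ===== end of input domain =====

-- B replaces A's nested index-driven while loops and manual string concatenation by a flat
-- single-pass state machine with a parts buffer joined on the closing quote (objective: simpler).

-- ===== PORT A =====
-- A's inner `while lst[i][-1] != '"'` loop; `none` marks exactly where Python raises IndexError
-- (running off the end of the list, or an empty token reached by `lst[i][-1]`).
-- `fuel` is only a structural-totality guard: each iteration moves i forward, so
-- fuel = ls.length never runs out on inputs where the Python loop terminates.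
def stringisizeInner : Nat → List (List Char) → Nat → List Char → Option (Nat × List Char)
  | 0, _, _, _ => none
  | fuel + 1, ls, i, s =>
    if h : i < ls.length then
      match PySem.List.pyGet? ls[i] (-1) with
      | none => none
      | some c =>
        if c ≠ '"' then stringisizeInner fuel ls (i + 1) (s ++ [' '] ++ ls[i])
        else some (i, s)
    else none

-- A's outer while loop; on inputs where Python raises (empty token at `lst[i][0]`/`lst[i][-1]`,
-- or an unterminated string) it stops and returns the tokens so far — those inputs are outside Pre_.
def stringisizeOuter : Nat → List (List Char) → Nat → List Char → List (List Char) → List (List Char)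
  | 0, _, _, _, tokens => tokens
  | fuel + 1, ls, i, s, tokens =>
    if h : i < ls.length then
      match PySem.List.pyGet? ls[i] 0 with
      | none => tokens
      | some c0 =>
        if c0 = '"' then
          match PySem.List.pyGet? ls[i] (-1) with
          | none => tokens
          | some cl =>
            if cl ≠ '"' then
              match stringisizeInner fuel ls (i + 1) (s ++ PySem.List.slice ls[i] (some 1) none) with
              | none => tokens
              | some (j, s') =>
                stringisizeOuter fuel ls (j + 1) []
                  (tokens ++ [s' ++ [' '] ++ PySem.List.slice (ls.getD j []) none (some (-1))])
            else
              stringisizeOuter fuel ls (i + 1) []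
                (tokens ++ [s ++ PySem.List.slice ls[i] (some 1) (some (-1))])
        else
          stringisizeOuter fuel ls (i + 1) s (tokens ++ [ls[i]])
    else tokens

def stringisize (lst : List String) : List String :=
  (stringisizeOuter (lst.map String.toList).length (lst.map String.toList) 0 [] []).map
    (fun cs => String.ofList cs)

-- ===== PORT B =====
-- one step of B's state machine: state = (emitted tokens, optional parts buffer of an open string)
def stringisizeStep :
    List (List Char) × Option (List (List Char)) → List Char →
    List (List Char) × Option (List (List Char))
  | (toks, some parts), t =>
    if PySem.Chars.endswith t ['"'] then
      (toks ++ [PySem.Chars.join [' '] (parts ++ [PySem.List.slice t none (some (-1))])], none)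
    else
      (toks, some (parts ++ [t]))
  | (toks, none), t =>
    if PySem.Chars.startswith t ['"'] then
      if PySem.Chars.endswith t ['"'] then
        (toks ++ [PySem.List.slice t (some 1) (some (-1))], none)
      else
        (toks, some [PySem.List.slice t (some 1) none])
    else
      (toks ++ [t], none)

def stringisize_alt (lst : List String) : List String :=
  (((lst.map String.toList).foldl stringisizeStep ([], none)).1).map (fun cs => String.ofList cs)

-- ===== PRECONDITION & SPEC =====
-- quote-balance state machine over the token shapes: `false` = outside a quoted string
def stringisizeWf : Bool → List (List Char) → Bool
  | mode, [] => !mode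
  | false, t :: r =>
    if t.head? == some '"' && !(t.getLast? == some '"') then stringisizeWf true r
    else stringisizeWf false r
  | true, t :: r =>
    if t.getLast? == some '"' then stringisizeWf false r else stringisizeWf true r

-- Pre_ excludes exactly the inputs on which A raises IndexError: an empty token (indexed by
-- lst[i][0] / lst[i][-1]) or a multi-token quoted string that is opened but never terminated.
def Pre_stringisize (lst : List String) : Prop :=
  (∀ t ∈ lst, t.toList ≠ []) ∧ stringisizeWf false (lst.map String.toList) = true
instance (lst : List String) : Decidable (Pre_stringisize lst) := by
  unfold Pre_stringisize; infer_instance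

def pvWitness_stringisize : List String := ["push", "\"hello", "there", "world\"", "\"x\"", "pop"]

def Spec_stringisize (lst : List String) (out : List String) : Prop := out = stringisize_alt lst
instance (lst : List String) (out : List String) : Decidable (Spec_stringisize lst out) := by
  unfold Spec_stringisize; infer_instance

-- ===== CLAIM (what is proved, stated in full; the proofs are below) =====
def Claim_equal_stringisize : Prop :=
  ∀ (lst : List String), Dom_stringisize lst → Pre_stringisize lst →
    Spec_stringisize lst (stringisize lst)

-- ===== LEMMAS AND PROOFS =====

theorem pyGet_zero (t : List Char) : PySem.List.pyGet? t 0 = t.head? := by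
  cases t <;> simp [PySem.List.pyGet?, PySem.List.pyIdx?]

theorem pyGet_neg_one (t : List Char) : PySem.List.pyGet? t (-1) = t.getLast? := by
  cases t with
  | nil => simp [PySem.List.pyGet?, PySem.List.pyIdx?]
  | cons a r =>
    rw [List.getLast?_eq_getElem?]
    simp [PySem.List.pyGet?, PySem.List.pyIdx?]

theorem startswith_singleton (t : List Char) (c : Char) :
    PySem.Chars.startswith t [c] = true ↔ t.head? = some c := by
  rw [PySem.Chars.startswith_iff]
  cases t with
  | nil => simp
  | cons a r => simp [List.cons_prefix_cons, eq_comm]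

theorem endswith_singleton (t : List Char) (c : Char) :
    PySem.Chars.endswith t [c] = true ↔ t.getLast? = some c := by
  rw [PySem.Chars.endswith_iff, ← List.reverse_prefix]
  show [c] <+: t.reverse ↔ _
  rw [← List.head?_reverse]
  cases t.reverse with
  | nil => simp
  | cons a r => simp [List.cons_prefix_cons, eq_comm]

theorem join_snoc (p0 : List Char) (ps : List (List Char)) (t : List Char) :
    PySem.Chars.join [' '] ((p0 :: ps) ++ [t]) =
      PySem.Chars.join [' '] (p0 :: ps) ++ [' '] ++ t := by
  induction ps generalizing p0 with
  | nil => simp [PySem.Chars.join, List.intercalate]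
  | cons q qs ih =>
    have h1 : ((p0 :: q :: qs) ++ [t]) = p0 :: q :: (qs ++ [t]) := by simp
    rw [h1, PySem.Chars.join_cons_cons, PySem.Chars.join_cons_cons]
    have h2 := ih q
    rw [List.cons_append] at h2
    rw [h2]
    simp [List.append_assoc]

theorem join_singleton' (t : List Char) : PySem.Chars.join [' '] [t] = t := by
  simp [PySem.Chars.join, List.intercalate]

-- main invariant: with enough fuel, A's outer loop agrees with B's fold on the suffix from i
-- (outside-string mode), and A's inner loop corresponds to B's parts-buffer fold run
-- (inside-string mode).
theorem stringisize_main (ls : List (List Char)) :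
    ∀ n i, ls.length - i ≤ n →
      ((∀ t ∈ ls.drop i, t ≠ []) → stringisizeWf false (ls.drop i) = true →
        ∀ toks, stringisizeOuter n ls i [] toks =
          ((ls.drop i).foldl stringisizeStep (toks, none)).1)
      ∧
      ((∀ t ∈ ls.drop i, t ≠ []) → stringisizeWf true (ls.drop i) = true →
        ∃ j smid, i ≤ j ∧ j < ls.length ∧ (ls.getD j []).getLast? = some '"' ∧
          (∀ t ∈ ls.drop (j + 1), t ≠ []) ∧ stringisizeWf false (ls.drop (j + 1)) = true ∧
          (∀ s, stringisizeInner n ls i s = some (j, s ++ smid)) ∧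
          (∀ toks p0 ps, ((ls.drop i).foldl stringisizeStep (toks, some (p0 :: ps))) =
            ((ls.drop (j + 1)).foldl stringisizeStep
              (toks ++ [PySem.Chars.join [' '] (p0 :: ps) ++ smid ++ [' '] ++
                PySem.List.slice (ls.getD j []) none (some (-1))], none)))) := by
  intro n
  induction n with
  | zero =>
    intro i hn
    have hi : ¬ i < ls.length := by omega
    have hdrop : ls.drop i = [] := List.drop_eq_nil_of_le (by omega)
    constructor
    · intro _ _ toks
      rw [hdrop]
      simp [stringisizeOuter]
    · intro _ hwf
      rw [hdrop] at hwf
      simp [stringisizeWf] at hwf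
  | succ n ih =>
    intro i hn
    by_cases hi : i < ls.length
    case neg =>
      have hdrop : ls.drop i = [] := List.drop_eq_nil_of_le (by omega)
      constructor
      · intro _ _ toks
        rw [hdrop]
        simp only [stringisizeOuter]
        rw [dif_neg hi]
        simp
      · intro _ hwf
        rw [hdrop] at hwf
        simp [stringisizeWf] at hwf
    case pos =>
    have hdrop : ls.drop i = ls[i] :: ls.drop (i + 1) := List.drop_eq_getElem_cons hi
    constructor
    · -- outside-string mode
      intro hne hwf toks
      have ht : ls[i] ≠ [] := hne ls[i] (by rw [hdrop]; exact List.mem_cons.mpr (Or.inl rfl))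
      have hne1 : ∀ t ∈ ls.drop (i + 1), t ≠ [] := fun t htm =>
        hne t (by rw [hdrop]; exact List.mem_cons_of_mem _ htm)
      obtain ⟨c0, hc0⟩ : ∃ c, ls[i].head? = some c := by
        cases hx : ls[i].head? with
        | none => exact absurd (List.head?_eq_none_iff.mp hx) ht
        | some c => exact ⟨c, rfl⟩
      obtain ⟨cl, hcl⟩ : ∃ c, ls[i].getLast? = some c := by
        cases hx : ls[i].getLast? with
        | none => exact absurd (List.getLast?_eq_none_iff.mp hx) ht
        | some c => exact ⟨c, rfl⟩
      rw [hdrop] at hwf ⊢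
      rw [List.foldl_cons]
      simp only [stringisizeOuter]
      rw [dif_pos hi, pyGet_zero, hc0]
      dsimp only
      by_cases hq : c0 = '"'
      · subst hq
        rw [if_pos rfl, pyGet_neg_one, hcl]
        dsimp only
        have hsw : PySem.Chars.startswith ls[i] ['"'] = true :=
          (startswith_singleton _ _).mpr hc0
        by_cases hq2 : cl = '"'
        · subst hq2
          rw [if_neg (by simp)]
          have hew : PySem.Chars.endswith ls[i] ['"'] = true :=
            (endswith_singleton _ _).mpr hcl
          dsimp only [stringisizeStep]
          rw [if_pos hsw, if_pos hew]
          rw [List.nil_append]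
          have hwf1 : stringisizeWf false (ls.drop (i + 1)) = true := by
            simp [stringisizeWf, hc0, hcl] at hwf
            exact hwf
          exact (ih (i + 1) (by omega)).1 hne1 hwf1 _
        · rw [if_pos hq2]
          have hewn : ¬ PySem.Chars.endswith ls[i] ['"'] = true := by
            intro hx
            apply hq2
            have h2 := (endswith_singleton _ _).mp hx
            rw [hcl] at h2
            exact (Option.some.injEq _ _).mp h2
          have hwf2 : stringisizeWf true (ls.drop (i + 1)) = true := by
            simp [stringisizeWf, hc0, hcl, hq2] at hwf
            exact hwf
          obtain ⟨j, smid, hij, hjlen, hjlast, hne', hwf', hinner, hfold⟩ :=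
            (ih (i + 1) (by omega)).2 hne1 hwf2
          dsimp only [stringisizeStep]
          rw [if_pos hsw, if_neg hewn]
          rw [hfold toks (PySem.List.slice ls[i] (some 1) none) []]
          rw [join_singleton']
          split
          · next heq =>
            rw [hinner] at heq
            exact absurd heq (by simp)
          · next j' s' heq =>
            rw [hinner] at heq
            simp only [Option.some.injEq, Prod.mk.injEq] at heq
            obtain ⟨hj1, hj2⟩ := heq
            subst hj1
            subst hj2
            have hO := (ih (j + 1) (by omega)).1 hne' hwf'
              (toks ++ [([] ++ PySem.List.slice ls[i] (some 1) none ++ smid) ++ [' '] ++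
                PySem.List.slice (ls.getD j []) none (some (-1))])
            rw [hO]
            simp [List.append_assoc]
      · rw [if_neg hq]
        have hswn : ¬ PySem.Chars.startswith ls[i] ['"'] = true := by
          intro hx
          apply hq
          have h2 := (startswith_singleton _ _).mp hx
          rw [hc0] at h2
          exact (Option.some.injEq _ _).mp h2
        dsimp only [stringisizeStep]
        rw [if_neg hswn]
        have hwf1 : stringisizeWf false (ls.drop (i + 1)) = true := by
          simp [stringisizeWf, hc0, hq] at hwf
          exact hwf
        exact (ih (i + 1) (by omega)).1 hne1 hwf1 _
    · -- inside-string mode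
      intro hne hwf
      have ht : ls[i] ≠ [] := hne ls[i] (by rw [hdrop]; exact List.mem_cons.mpr (Or.inl rfl))
      have hne1 : ∀ t ∈ ls.drop (i + 1), t ≠ [] := fun t htm =>
        hne t (by rw [hdrop]; exact List.mem_cons_of_mem _ htm)
      obtain ⟨cl, hcl⟩ : ∃ c, ls[i].getLast? = some c := by
        cases hx : ls[i].getLast? with
        | none => exact absurd (List.getLast?_eq_none_iff.mp hx) ht
        | some c => exact ⟨c, rfl⟩
      rw [hdrop] at hwf
      have hgd : ls.getD i [] = ls[i] := List.getD_eq_getElem ls [] hi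
      by_cases hq : cl = '"'
      · subst hq
        have hew : PySem.Chars.endswith ls[i] ['"'] = true :=
          (endswith_singleton _ _).mpr hcl
        have hwf1 : stringisizeWf false (ls.drop (i + 1)) = true := by
          simp [stringisizeWf, hcl] at hwf
          exact hwf
        refine ⟨i, [], le_refl i, hi, ?_, hne1, hwf1, ?_, ?_⟩
        · rw [hgd]; exact hcl
        · intro s
          simp only [stringisizeInner]
          rw [dif_pos hi, pyGet_neg_one, hcl]
          dsimp only
          rw [if_neg (by simp)]
          simp
        · intro toks p0 ps
          rw [hdrop, List.foldl_cons]
          dsimp only [stringisizeStep]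
          rw [if_pos hew, join_snoc, hgd]
          simp [List.append_assoc]
      · have hewn : ¬ PySem.Chars.endswith ls[i] ['"'] = true := by
          intro hx
          apply hq
          have h2 := (endswith_singleton _ _).mp hx
          rw [hcl] at h2
          exact (Option.some.injEq _ _).mp h2
        have hwf2 : stringisizeWf true (ls.drop (i + 1)) = true := by
          simp [stringisizeWf, hcl, hq] at hwf
          exact hwf
        obtain ⟨j, smid, hij, hjlen, hjlast, hne', hwf', hinner, hfold⟩ :=
          (ih (i + 1) (by omega)).2 hne1 hwf2
        refine ⟨j, [' '] ++ ls[i] ++ smid, by omega, hjlen, hjlast, hne', hwf', ?_, ?_⟩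
        · intro s
          simp only [stringisizeInner]
          rw [dif_pos hi, pyGet_neg_one, hcl]
          dsimp only
          rw [if_pos hq]
          rw [hinner (s ++ [' '] ++ ls[i])]
          simp [List.append_assoc]
        · intro toks p0 ps
          rw [hdrop, List.foldl_cons]
          dsimp only [stringisizeStep]
          rw [if_neg hewn]
          rw [show (p0 :: ps) ++ [ls[i]] = p0 :: (ps ++ [ls[i]]) from by simp]
          rw [hfold toks p0 (ps ++ [ls[i]])]
          rw [show p0 :: (ps ++ [ls[i]]) = (p0 :: ps) ++ [ls[i]] from by simp, join_snoc]
          simp [List.append_assoc]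

-- ===== VERDICT (by name: the statement is the Claim_ definition above) =====
theorem stringisize_spec : Claim_equal_stringisize := by
  unfold Claim_equal_stringisize
  intro lst _ hpre
  obtain ⟨hne, hwf⟩ := hpre
  unfold Spec_stringisize stringisize stringisize_alt
  have h := (stringisize_main (lst.map String.toList) (lst.map String.toList).length 0
      (by omega)).1 ?_ ?_ []
  · rw [List.drop_zero] at h
    rw [h]
  · intro t htm
    rw [List.drop_zero] at htm
    obtain ⟨u, hu, rfl⟩ := List.mem_map.mp htm
    exact hne u hu
  · rw [List.drop_zero]
    exact hwf
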